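-- pv_equiv track=rewrite | github.com/linyuchen/lyc-qqrobot | src/common/game21/game21pointbase.py | get_max_point
-- ===== SOURCE A (Python) =====
-- def get_max_point(point_list):
--
--     point_list.sort()
--
--     if point_list[0] < 22:
--         max_point = point_list[0]
--         for point in point_list[1:]:
--             if max_point < point < 22:
--                 max_point = point
--     else:
--         max_point = point_list[0]
--
--     return max_point
-- ===== SOURCE B (Python) =====
-- def get_max_point(point_list):
--     # Single linear pass: track the minimum and the largest point below 22.
--     # (A sorts point_list in place; B does not mutate it -- equivalence is about the return value.)
--     lo = None
--     best = None
--     for p in point_list: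
--         if lo is None or p < lo:
--             lo = p
--         if p < 22 and (best is None or best < p):
--             best = p
--     return best if best is not None else lo
-- ===== Notes on version B (the rewrite author's own statement) =====
-- stated objective: faster
-- what changed: Replaced sort-then-scan with a single linear pass that tracks the minimum and the largest element below 22; B also does not mutate the input list (A sorts it in place).
-- outside the precondition, e.g. on get_max_point([]): A raises IndexError, B returns None
import Mathlib
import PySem

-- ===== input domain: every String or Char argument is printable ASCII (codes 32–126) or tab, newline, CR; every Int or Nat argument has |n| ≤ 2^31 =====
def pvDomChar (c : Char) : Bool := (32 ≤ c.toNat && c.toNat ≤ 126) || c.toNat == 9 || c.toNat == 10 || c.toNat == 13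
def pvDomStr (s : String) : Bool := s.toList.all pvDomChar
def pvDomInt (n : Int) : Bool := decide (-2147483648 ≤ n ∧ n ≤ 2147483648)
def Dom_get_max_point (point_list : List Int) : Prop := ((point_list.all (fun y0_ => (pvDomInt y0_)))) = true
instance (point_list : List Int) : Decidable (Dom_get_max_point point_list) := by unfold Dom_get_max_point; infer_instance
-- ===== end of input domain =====

-- B replaces A's sort-then-scan by one linear pass tracking the minimum and the largest
-- element below 22 (A also sorts the list in place; the equivalence proved is about the
-- return value only).


-- ===== PORT A =====
-- point_list.sort(); point_list[0] raises IndexError on [] (excluded by Pre_);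
-- then a scan over point_list[1:] keeping the last point with max_point < point < 22.
def get_max_point (point_list : List Int) : Int :=
  match PySem.List.sorted point_list (fun x => x) false with
  | [] => 0  -- Python raises IndexError here; excluded by Pre_get_max_point
  | h :: t =>
    if h < 22 then
      t.foldl (fun mp p => if mp < p ∧ p < 22 then p else mp) h
    else h

-- ===== PORT B =====
-- the two per-element updates of Source B's single loop
def pvLoStep (lo : Option Int) (p : Int) : Option Int :=
  match lo with
  | none => some p
  | some l => if p < l then some p else some l

def pvBestStep (best : Option Int) (p : Int) : Option Int :=
  if p < 22 then
    match best with
    | none => some p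
    | some b => if b < p then some p else some b
  else best

def get_max_point_alt (point_list : List Int) : Int :=
  let st := point_list.foldl (fun acc p => (pvLoStep acc.1 p, pvBestStep acc.2 p))
              ((none : Option Int), (none : Option Int))
  match st.2 with
  | some b => b
  | none => st.1.getD 0  -- Source B returns lo here; under Pre_ lo is always some value

-- ===== PRECONDITION & SPEC =====
-- A raises IndexError on the empty list (point_list[0]); exactly those inputs are excluded.
def Pre_get_max_point (point_list : List Int) : Prop := point_list ≠ []
instance (point_list : List Int) : Decidable (Pre_get_max_point point_list) := by unfold Pre_get_max_point; infer_instance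
def pvWitness_get_max_point : List Int := [25, 3, 21, 30]

def Spec_get_max_point (point_list : List Int) (out : Int) : Prop := out = get_max_point_alt point_list
instance (point_list : List Int) (out : Int) : Decidable (Spec_get_max_point point_list out) := by unfold Spec_get_max_point; infer_instance

-- ===== CLAIM (what is proved, stated in full; the proofs are below) =====
def Claim_equal_get_max_point : Prop := ∀ (point_list : List Int), Dom_get_max_point point_list → Pre_get_max_point point_list → Spec_get_max_point point_list (get_max_point point_list)

-- ===== LEMMAS AND PROOFS =====

-- fold over the pair state splits into the two component folds
theorem pvPairFold (t : List Int) (a b : Option Int) :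
    t.foldl (fun acc p => (pvLoStep acc.1 p, pvBestStep acc.2 p)) (a, b)
      = (t.foldl pvLoStep a, t.foldl pvBestStep b) := by
  induction t generalizing a b with
  | nil => rfl
  | cons p t ih => simp [List.foldl, ih]

-- a fold with a two-argument-commutative step is invariant under permutation
theorem pvFoldlPerm {α β : Type} {f : β → α → β}
    (hc : ∀ b a1 a2, f (f b a1) a2 = f (f b a2) a1)
    {l1 l2 : List α} (hp : l1.Perm l2) : ∀ b, l1.foldl f b = l2.foldl f b := by
  induction hp with
  | nil => intro b; rfl
  | cons x _ ih => intro b; simp [List.foldl, ih]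
  | swap x y l => intro b; simp [List.foldl, hc]
  | trans _ _ ih1 ih2 => intro b; rw [ih1, ih2]

theorem pvLoStepEq (b : Option Int) (p : Int) :
    pvLoStep b p = some (min (b.getD p) p) := by
  cases b <;> simp only [pvLoStep, Option.getD_some, Option.getD_none, min_self]
  split_ifs <;> simp only [Option.some.injEq] <;> omega

theorem pvLoComm (b : Option Int) (p q : Int) :
    pvLoStep (pvLoStep b p) q = pvLoStep (pvLoStep b q) p := by
  cases b <;>
    simp only [pvLoStepEq, Option.getD_some, Option.getD_none, Option.some.injEq] <;> omega

theorem pvBestStepEq (b : Option Int) (p : Int) :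
    pvBestStep b p = if p < 22 then some (max (b.getD p) p) else b := by
  cases b <;> simp only [pvBestStep, Option.getD_some, Option.getD_none, max_self]
  split_ifs <;> simp only [Option.some.injEq] <;> omega

theorem pvBestComm (b : Option Int) (p q : Int) :
    pvBestStep (pvBestStep b p) q = pvBestStep (pvBestStep b q) p := by
  by_cases hp : p < 22 <;> by_cases hq : q < 22 <;> cases b <;>
    simp only [pvBestStepEq, hp, hq, if_true, if_false,
      Option.getD_some, Option.getD_none, Option.some.injEq] <;> omega

-- A's inner scan computes the max of the accumulator and the elements below 22
theorem pvFoldA (t : List Int) (m : Int) (hm : m < 22) :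
    t.foldl (fun mp p => if mp < p ∧ p < 22 then p else mp) m
      = (t.filter (fun p => p < 22)).foldl max m := by
  induction t generalizing m with
  | nil => rfl
  | cons p t ih =>
    rw [List.foldl_cons, List.filter_cons]
    by_cases hp : p < 22
    · by_cases h2 : m < p
      · rw [show (if m < p ∧ p < 22 then p else m) = p by simp [h2, hp]]
        rw [ih p hp]
        simp [hp, max_eq_right (le_of_lt h2)]
      · rw [show (if m < p ∧ p < 22 then p else m) = m by simp_all]
        rw [ih m hm]
        simp [hp, max_eq_left (by omega : p ≤ m)]
    · rw [show (if m < p ∧ p < 22 then p else m) = m by simp [hp]]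
      rw [ih m hm]
      simp [hp]

-- B's best-tracking fold, once seeded, is the same filtered max fold
theorem pvFoldBest (t : List Int) (m : Int) :
    t.foldl pvBestStep (some m) = some ((t.filter (fun p => p < 22)).foldl max m) := by
  induction t generalizing m with
  | nil => rfl
  | cons p t ih =>
    by_cases hp : p < 22
    · by_cases h2 : m < p
      · simp [List.foldl, pvBestStep, hp, h2, ih,
          max_eq_right (le_of_lt h2)]
      · simp [List.foldl, pvBestStep, hp, h2, ih,
          max_eq_left (by omega : p ≤ m)]
    · simp [List.foldl, pvBestStep, hp, ih]

theorem pvFoldBestNone (t : List Int) (h : ∀ p ∈ t, ¬ p < 22) :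
    t.foldl pvBestStep none = none := by
  induction t with
  | nil => rfl
  | cons p t ih =>
    have hp := h p (by simp)
    simp only [List.foldl, pvBestStep, hp, if_false]
    exact ih (fun q hq => h q (by simp [hq]))

theorem pvFoldLo (t : List Int) (m : Int) :
    t.foldl pvLoStep (some m) = some (t.foldl min m) := by
  induction t generalizing m with
  | nil => rfl
  | cons p t ih =>
    by_cases h2 : p < m
    · simp [List.foldl, pvLoStep, h2, ih, min_eq_right (le_of_lt h2)]
    · simp [List.foldl, pvLoStep, h2, ih, min_eq_left (by omega : m ≤ p)]

theorem pvFoldMinSelf (t : List Int) (m : Int) (h : ∀ p ∈ t, m ≤ p) :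
    t.foldl min m = m := by
  induction t with
  | nil => rfl
  | cons p t ih =>
    have hp := h p (by simp)
    simp only [List.foldl, min_eq_left hp]
    exact ih (fun q hq => h q (by simp [hq]))

-- ===== VERDICT (by name: the statement is the Claim_ definition above) =====
theorem get_max_point_spec : Claim_equal_get_max_point := by
  intro xs _ hpre
  unfold Spec_get_max_point get_max_point get_max_point_alt
  obtain ⟨h, t, hs⟩ : ∃ h t, PySem.List.sorted xs (fun x => x) false = h :: t := by
    cases hsort : PySem.List.sorted xs (fun x => x) false with
    | nil => exact absurd ((PySem.List.sorted_eq_nil_iff xs (fun x => x) false).mp hsort) hpre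
    | cons h t => exact ⟨h, t, rfl⟩
  have hperm : (h :: t).Perm xs := hs ▸ PySem.List.sorted_perm xs (fun x => x) false
  have hmin : ∀ y ∈ xs, h ≤ y := PySem.List.key_head_sorted_le xs (fun x => x) hs
  rw [hs, pvPairFold]
  have hlo : xs.foldl pvLoStep none = some (t.foldl min h) := by
    rw [pvFoldlPerm pvLoComm hperm.symm, List.foldl_cons]
    exact pvFoldLo t h
  have hbestperm : xs.foldl pvBestStep none = (h :: t).foldl pvBestStep none :=
    pvFoldlPerm pvBestComm hperm.symm none
  by_cases hh : h < 22
  · have hbest : xs.foldl pvBestStep none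
        = some ((t.filter (fun p => p < 22)).foldl max h) := by
      rw [hbestperm, List.foldl_cons, show pvBestStep none h = some h by simp [pvBestStep, hh]]
      exact pvFoldBest t h
    simp only [hbest, hh, if_true]
    exact pvFoldA t h hh
  · have h22 : ∀ p ∈ t, ¬ p < 22 := by
      intro p hp
      have : h ≤ p := hmin p (hperm.mem_iff.mp (by simp [hp]))
      omega
    have hbest : xs.foldl pvBestStep none = none := by
      rw [hbestperm, List.foldl_cons, show pvBestStep none h = none by simp [pvBestStep, hh]]
      exact pvFoldBestNone t h22
    have hminself : t.foldl min h = h :=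
      pvFoldMinSelf t h (fun p hp => hmin p (hperm.mem_iff.mp (by simp [hp])))
    simp [hbest, hlo, hh, hminself]
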